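-- pv_equiv track=rewrite | github.com/alextdart/advent_of_code2025 | day1/d1p2.py | perform_left_move
-- ===== SOURCE A (Python) =====
-- def perform_left_move(init_pos, distance):
--     cur_pos = init_pos
--     remaining_distance = distance
--     count = 0
--     while remaining_distance:
--         remaining_distance -= 1
--         if cur_pos == 0:
--             cur_pos = 99
--         elif(cur_pos == 1):
--             cur_pos = 0
--             count += 1
--         else:
--             cur_pos -= 1
--     return (cur_pos, count)
-- ===== SOURCE B (Python) =====
-- def perform_left_move(init_pos, distance):
--     # Position on a 0..99 dial after moving left `distance` steps, plus the
--     # number of times the walker lands on 0.  The walker is at 0 exactly at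
--     # steps t = init_pos, init_pos + 100, init_pos + 200, ... (only t >= 1
--     # count, since step 0 is the starting position).
--     pos = (init_pos - distance) % 100
--     first = init_pos if init_pos >= 1 else 100
--     count = (distance - first) // 100 + 1 if distance >= first else 0
--     return (pos, count)
-- ===== Notes on version B (the rewrite author's own statement) =====
-- stated objective: simpler
-- what changed: Replaced the step-by-step decrement loop with a closed form (modular final position and a floor-division count of the steps at which the walker lands on 0); Pre_ restricts to the natural domain of a 0..99 dial position and a non-negative distance: A loops forever on negative distance, and on a start outside 0..99 A's un-wrapped countdown is an accident of its loop.
-- outside the precondition, e.g. on perform_left_move(-5, 3): A returns (-8, 0), B returns (92, 0); on perform_left_move(150, 1): A returns (149, 0), B returns (49, 0); on perform_left_move(3, -1): A does not finish within the time limit, B returns (4, 0)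
import Mathlib
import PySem

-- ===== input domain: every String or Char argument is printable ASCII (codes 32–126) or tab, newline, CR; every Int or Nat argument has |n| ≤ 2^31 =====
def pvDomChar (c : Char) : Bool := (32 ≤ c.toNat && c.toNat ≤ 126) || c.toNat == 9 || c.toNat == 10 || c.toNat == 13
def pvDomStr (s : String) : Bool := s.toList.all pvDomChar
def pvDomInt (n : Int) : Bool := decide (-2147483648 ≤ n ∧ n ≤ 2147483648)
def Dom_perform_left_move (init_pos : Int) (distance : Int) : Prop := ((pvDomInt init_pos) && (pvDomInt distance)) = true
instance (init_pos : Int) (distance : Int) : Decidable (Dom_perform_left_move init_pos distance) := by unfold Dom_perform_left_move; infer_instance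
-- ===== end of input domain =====

-- B replaces A's per-step decrement loop by an closed form (modular position + floor-division landing count); Pre_ restricts to a 0..99 dial start and non-negative distance.

-- ===== PORT A =====
-- A's while-loop runs exactly `distance` iterations (Pre_ gives 0 ≤ distance), carried as Nat fuel.
def pvLoopA : Nat → Int → Int → Int × Int
  | 0, cur, count => (cur, count)
  | n+1, cur, count =>
    if cur = 0 then pvLoopA n 99 count
    else if cur = 1 then pvLoopA n 0 (count + 1)
    else pvLoopA n (cur - 1) count

def perform_left_move (init_pos : Int) (distance : Int) : Int × Int :=
  pvLoopA distance.toNat init_pos 0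

-- ===== PORT B =====
def perform_left_move_alt (init_pos : Int) (distance : Int) : Int × Int :=
  let pos := PySem.Int.mod (init_pos - distance) 100
  let first := if init_pos ≥ 1 then init_pos else 100
  let count := if distance ≥ first then PySem.Int.floordiv (distance - first) 100 + 1 else 0
  (pos, count)

-- ===== PRECONDITION & SPEC =====
-- Pre_ excludes negative distance, on which A's while-loop never terminates, and starting
-- positions outside the 0..99 dial (the function's natural domain), on which A's countdown
-- never wraps (or wraps late) — an accident of its decrement loop.
def Pre_perform_left_move (init_pos : Int) (distance : Int) : Prop :=
  0 ≤ init_pos ∧ init_pos ≤ 99 ∧ 0 ≤ distance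
instance (init_pos : Int) (distance : Int) : Decidable (Pre_perform_left_move init_pos distance) := by unfold Pre_perform_left_move; infer_instance
def pvWitness_perform_left_move : Int × Int := (7, 250)

def Spec_perform_left_move (init_pos : Int) (distance : Int) (out : Int × Int) : Prop := out = perform_left_move_alt init_pos distance
instance (init_pos : Int) (distance : Int) (out : Int × Int) : Decidable (Spec_perform_left_move init_pos distance out) := by unfold Spec_perform_left_move; infer_instance

-- ===== CLAIM (what is proved, stated in full; the proofs are below) =====
def Claim_equal_perform_left_move : Prop := ∀ (init_pos : Int) (distance : Int), Dom_perform_left_move init_pos distance → Pre_perform_left_move init_pos distance → Spec_perform_left_move init_pos distance (perform_left_move init_pos distance)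

-- ===== LEMMAS AND PROOFS =====

theorem alt_zero (cur : Int) (h0 : 0 ≤ cur) (h99 : cur ≤ 99) :
    perform_left_move_alt cur 0 = (cur, 0) := by
  unfold perform_left_move_alt
  simp only [PySem.Int.mod_eq_emod_of_pos (show (0:Int) < 100 by norm_num),
    PySem.Int.floordiv_eq_ediv_of_pos (show (0:Int) < 100 by norm_num)]
  split_ifs <;> refine Prod.ext ?_ ?_ <;> simp <;> omega

-- one loop step corresponds to distance n+1 vs n on the closed form
theorem alt_step (cur : Int) (h0 : 0 ≤ cur) (h99 : cur ≤ 99) (n : Int) (hn : 0 ≤ n) :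
    perform_left_move_alt cur (n + 1) =
      ((perform_left_move_alt (if cur = 0 then 99 else cur - 1) n).1,
       (perform_left_move_alt (if cur = 0 then 99 else cur - 1) n).2 + (if cur = 1 then 1 else 0)) := by
  unfold perform_left_move_alt
  simp only [PySem.Int.mod_eq_emod_of_pos (show (0:Int) < 100 by norm_num),
    PySem.Int.floordiv_eq_ediv_of_pos (show (0:Int) < 100 by norm_num)]
  by_cases hc0 : cur = 0
  · subst hc0
    simp only [if_pos rfl]
    split_ifs <;> refine Prod.ext ?_ ?_ <;> simp <;> omega
  · simp only [if_neg hc0]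
    split_ifs <;> refine Prod.ext ?_ ?_ <;> simp <;> omega

theorem loopA_eq (m : Nat) : ∀ (cur c : Int), 0 ≤ cur → cur ≤ 99 →
    pvLoopA m cur c = ((perform_left_move_alt cur (m : Int)).1, c + (perform_left_move_alt cur (m : Int)).2) := by
  induction m with
  | zero => intro cur c h0 h99; simp [pvLoopA, alt_zero cur h0 h99]
  | succ n ih =>
    intro cur c h0 h99
    have hn : (0:Int) ≤ (n : Int) := by positivity
    have hstep := alt_step cur h0 h99 (n : Int) hn
    have hcast : ((n + 1 : Nat) : Int) = (n : Int) + 1 := by push_cast; ring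
    rw [hcast] at *
    unfold pvLoopA
    by_cases hc0 : cur = 0
    · subst hc0
      rw [if_pos rfl, ih 99 c (by norm_num) (by norm_num), hstep]
      norm_num
    · rw [if_neg hc0]
      by_cases hc1 : cur = 1
      · subst hc1
        rw [if_pos rfl, ih 0 (c + 1) (by norm_num) (by norm_num), hstep]
        norm_num
        ring
      · rw [if_neg hc1, ih (cur - 1) c (by omega) (by omega), hstep]
        simp [hc0, hc1]

-- ===== VERDICT (by name: the statement is the Claim_ definition above) =====
theorem perform_left_move_spec : Claim_equal_perform_left_move := by
  intro init_pos distance _ hpre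
  obtain ⟨h0, h99, hd⟩ := hpre
  unfold Spec_perform_left_move perform_left_move
  rw [loopA_eq distance.toNat init_pos 0 h0 h99]
  have : ((distance.toNat : Nat) : Int) = distance := Int.toNat_of_nonneg hd
  rw [this]
  simp
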